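-- pv_equiv track=rewrite | github.com/uniaIex/sep4-unsupervised-outlier-detection | csv-cleaner.py | count_fields
-- ===== SOURCE A (Python) =====
-- def count_fields(line):
--     """Count the number of fields in a CSV line, accounting for quoted commas"""
--     # Basic CSV parser to count fields correctly
--     fields = 0
--     in_quotes = False
--     i = 0
--
--     while i < len(line):
--         if line[i] == '"':
--             # Toggle quote status
--             in_quotes = not in_quotes
--             i += 1
--         elif line[i] == ',' and not in_quotes:
--             # Only count commas outside of quotes as field separators
--             fields += 1
--             i += 1
--         else:
--             i += 1
--
--     # Count the last field
--     fields += 1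
--     return fields
-- ===== SOURCE B (Python) =====
-- def count_fields(line):
--     """Count the number of fields in a CSV line, accounting for quoted commas"""
--     # Quote state starts outside and toggles at each '"', so after splitting on '"',
--     # the even-index segments are exactly the text outside quotes.
--     parts = line.split('"')
--     return 1 + sum(part.count(',') for i, part in enumerate(parts) if i % 2 == 0)
-- ===== Notes on version B (the rewrite author's own statement) =====
-- stated objective: faster
-- what changed: B replaces A's Python-level character-by-character scan with an in_quotes flag by one str.split on the double-quote character followed by str.count of commas in the even-index (outside-quotes) segments, pushing the per-character work into C-level string methods.
import Mathlib
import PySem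

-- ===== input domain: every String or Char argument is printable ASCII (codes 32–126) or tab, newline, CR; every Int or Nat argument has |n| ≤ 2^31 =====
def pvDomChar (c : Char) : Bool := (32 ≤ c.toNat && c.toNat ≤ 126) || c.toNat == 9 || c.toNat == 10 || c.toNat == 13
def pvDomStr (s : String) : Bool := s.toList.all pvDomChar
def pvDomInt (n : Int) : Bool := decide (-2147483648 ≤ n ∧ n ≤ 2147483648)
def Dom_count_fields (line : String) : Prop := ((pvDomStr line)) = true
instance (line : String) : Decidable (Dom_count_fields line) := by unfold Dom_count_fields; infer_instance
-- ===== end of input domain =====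

-- B replaces A's per-character scan with an in_quotes flag by one split on the double-quote
-- character and a count of commas in the even-index (outside-quotes) segments; the timing
-- run measured B faster (C-level str methods, constant-factor).

-- ===== PORT A =====
-- A's while loop over i with state (fields, in_quotes), as structural recursion over the characters
def countFieldsLoop : List Char → Int → Bool → Int
  | [], fields, _ => fields
  | c :: rest, fields, inq =>
    if c = '"' then countFieldsLoop rest fields (!inq)
    else if c = ',' ∧ inq = false then countFieldsLoop rest (fields + 1) inq
    else countFieldsLoop rest fields inq

def count_fields (line : String) : Int :=
  countFieldsLoop line.toList 0 false + 1

-- ===== PORT B =====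
-- parts = line.split('"'); 1 + sum(part.count(',') for i, part in enumerate(parts) if i % 2 == 0)
def count_fields_alt (line : String) : Int :=
  let parts := PySem.Chars.splitOn line.toList ['"']
  1 + (((PySem.List.enumerate parts 0).filter (fun ip => ip.1 % 2 == 0)).map
        (fun ip => (PySem.Chars.count ip.2 [','] : Int))).sum

-- ===== PRECONDITION & SPEC =====
def Spec_count_fields (line : String) (out : Int) : Prop := out = count_fields_alt line
instance (line : String) (out : Int) : Decidable (Spec_count_fields line out) := by unfold Spec_count_fields; infer_instance

-- ===== CLAIM (what is proved, stated in full; the proofs are below) =====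
def Claim_equal_count_fields : Prop := ∀ (line : String), Dom_count_fields line → Spec_count_fields line (count_fields line)

-- ===== LEMMAS AND PROOFS =====
-- reference splitter: split a char list on '"'
def qsplit : List Char → List (List Char)
  | [] => [[]]
  | c :: rest =>
    if c = '"' then [] :: qsplit rest
    else
      match qsplit rest with
      | [] => [[c]]
      | p :: ps => (c :: p) :: ps

-- prepend a prefix onto the first piece
def consHd (pre : List Char) : List (List Char) → List (List Char)
  | [] => [pre]
  | p :: ps => (pre ++ p) :: ps

theorem qsplit_ne_nil (cs : List Char) : qsplit cs ≠ [] := by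
  cases cs with
  | nil => simp [qsplit]
  | cons c rest =>
    simp only [qsplit]
    split
    · simp
    · split <;> simp

theorem count_go_eq (fuel : Nat) (l : List Char) (acc : Nat) (h : l.length ≤ fuel) :
    PySem.Chars.count.go [','] fuel l acc = acc + l.count ',' := by
  induction fuel generalizing l acc with
  | zero =>
    have : l = [] := by cases l <;> simp_all
    subst this; rw [PySem.Chars.count.go.eq_def]; simp
  | succ f ih =>
    cases l with
    | nil => rw [PySem.Chars.count.go.eq_def]; simp
    | cons c t =>
      rw [PySem.Chars.count.go.eq_def]
      simp only [List.length_cons] at h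
      by_cases hc : c = ','
      · subst hc
        have hp : (List.isPrefixOf [','] (',' :: t)) = true := by simp [List.isPrefixOf]
        simp only [hp, if_true, List.length_cons, List.length_nil, List.drop_succ_cons,
          List.drop_zero]
        rw [ih t (acc + 1) (by omega)]
        simp
        omega
      · have hp : (List.isPrefixOf [','] (c :: t)) = false := by
          simp [List.isPrefixOf, BEq.beq]
          intro hh; exact absurd hh.symm hc
        simp only [hp, Bool.false_eq_true, if_false]
        rw [ih t acc (by omega)]
        simp [List.count_cons]
        intro hh; exact absurd hh hc

theorem chars_count_comma (cs : List Char) : PySem.Chars.count cs [','] = cs.count ',' := by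
  unfold PySem.Chars.count
  simp only [List.isEmpty_cons, Bool.false_eq_true, if_false]
  rw [count_go_eq cs.length cs 0 (le_refl _)]
  omega

theorem splitOn_go_eq (fuel : Nat) (l cur : List Char) (acc : List (List Char))
    (h : l.length ≤ fuel) :
    PySem.Chars.splitOn.go ['"'] fuel l cur acc = acc.reverse ++ consHd cur.reverse (qsplit l) := by
  induction fuel generalizing l cur acc with
  | zero =>
    have : l = [] := by cases l <;> simp_all
    subst this
    rw [PySem.Chars.splitOn.go.eq_def]
    simp [qsplit, consHd]
  | succ f ih =>
    cases l with
    | nil =>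
      rw [PySem.Chars.splitOn.go.eq_def]
      simp [qsplit, consHd]
    | cons c t =>
      rw [PySem.Chars.splitOn.go.eq_def]
      simp only [List.length_cons] at h
      by_cases hc : c = '"'
      · subst hc
        have hp : (List.isPrefixOf ['"'] ('"' :: t)) = true := by simp [List.isPrefixOf]
        simp only [hp, if_true, List.length_cons, List.length_nil, List.drop_succ_cons,
          List.drop_zero]
        rw [ih t [] (cur.reverse :: acc) (by omega)]
        simp only [qsplit, reduceIte]
        have hq := qsplit_ne_nil t
        cases hqs : qsplit t with
        | nil => exact absurd hqs hq
        | cons p ps => simp [consHd]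
      · have hp : (List.isPrefixOf ['"'] (c :: t)) = false := by
          simp [List.isPrefixOf, BEq.beq]
          intro hh; exact absurd hh.symm hc
        simp only [hp, Bool.false_eq_true, if_false]
        rw [ih t (c :: cur) acc (by omega)]
        simp only [qsplit, if_neg hc]
        have hq := qsplit_ne_nil t
        cases hqs : qsplit t with
        | nil => exact absurd hqs hq
        | cons p ps => simp [consHd]

theorem splitOn_quote (cs : List Char) : PySem.Chars.splitOn cs ['"'] = qsplit cs := by
  unfold PySem.Chars.splitOn
  rw [splitOn_go_eq (cs.length + 1) cs [] [] (by omega)]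
  have hq := qsplit_ne_nil cs
  cases hqs : qsplit cs with
  | nil => exact absurd hqs hq
  | cons p ps => simp [consHd]

-- alternating comma count: b = true means the current piece is inside quotes (odd index)
def csum : List (List Char) → Bool → Nat
  | [], _ => 0
  | p :: ps, b => (if b then 0 else p.count ',') + csum ps (!b)

theorem loopA_eq (cs : List Char) (fields : Int) (inq : Bool) :
    countFieldsLoop cs fields inq = fields + (csum (qsplit cs) inq : Int) := by
  induction cs generalizing fields inq with
  | nil => cases inq <;> simp [countFieldsLoop, qsplit, csum]
  | cons c rest ih =>
    by_cases hc : c = '"'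
    · subst hc
      simp only [countFieldsLoop, reduceIte, qsplit]
      rw [ih]
      cases inq <;> simp [csum]
    · have hq := qsplit_ne_nil rest
      cases hqs : qsplit rest with
      | nil => exact absurd hqs hq
      | cons p ps =>
        simp only [countFieldsLoop, if_neg hc, qsplit, hqs]
        by_cases hcm : c = ',' ∧ inq = false
        · obtain ⟨hcm1, hcm2⟩ := hcm; subst hcm1; subst hcm2
          rw [if_pos ⟨rfl, rfl⟩, ih]
          simp [csum, hqs]
          ring
        · rw [if_neg hcm, ih]
          simp only [csum, hqs]
          cases inq with
          | true => simp
          | false =>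
            have hcne : c ≠ ',' := fun hh => hcm ⟨hh, rfl⟩
            simp [hcne]

theorem enum_sum_eq (ps : List (List Char)) (k : Nat) :
    (((PySem.List.enumerate ps (k : Int)).filter (fun ip => ip.1 % 2 == 0)).map
        (fun ip => (PySem.Chars.count ip.2 [','] : Int))).sum
      = (csum ps (k % 2 == 1) : Int) := by
  induction ps generalizing k with
  | nil => simp [PySem.List.enumerate_nil, csum]
  | cons p ps ih =>
    rw [PySem.List.enumerate_cons, List.filter_cons]
    have hk1 : ((k : Int) + 1) = ((k + 1 : Nat) : Int) := by push_cast; ring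
    rcases Nat.even_or_odd k with he | ho
    · have h0 : k % 2 = 0 := Nat.even_iff.mp he
      have hf : (((k : Int), p).1 % 2 == 0) = true := by simp; omega
      rw [hf]
      simp only [if_true, List.map_cons, List.sum_cons, hk1, ih]
      have h1 : (k + 1) % 2 = 1 := by omega
      simp [csum, h0, h1, chars_count_comma]
    · have h1 : k % 2 = 1 := Nat.odd_iff.mp ho
      have hf : (((k : Int), p).1 % 2 == 0) = false := by simp; omega
      rw [hf]
      simp only [Bool.false_eq_true, if_false, hk1, ih]
      have h0 : (k + 1) % 2 = 0 := by omega
      simp [csum, h0, h1]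

-- ===== VERDICT (by name: the statement is the Claim_ definition above) =====
theorem count_fields_spec : Claim_equal_count_fields := by
  intro line _
  unfold Spec_count_fields count_fields count_fields_alt
  simp only [splitOn_quote, loopA_eq]
  have h := enum_sum_eq (qsplit line.toList) 0
  norm_num at h
  rw [h]
  simp [show ((0 : Nat) == 1) = false from rfl]
  ring
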